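-- pv_equiv track=rewrite | github.com/lifelike/gamebookformat | formatgamebook.py | include_for_output_format
-- ===== SOURCE A (Python) =====
-- def include_for_output_format(tags, output_format_tag):
--     include = True
--     for tag in tags:
--         if tag.isupper():
--             if tag == output_format_tag:
--                 return True
--             else:
--                 include = False
--     return include
-- ===== SOURCE B (Python) =====
-- def include_for_output_format(tags, output_format_tag):
--     # A tag can only match if it equals the target, and then it is uppercase
--     # exactly when the target is: so test the target's case once and plain
--     # membership in the raw list; otherwise include iff no uppercase tag exists.
--     if output_format_tag.isupper() and output_format_tag in tags:
--         return True
--     return not any(t.isupper() for t in tags)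
-- ===== Notes on version B (the rewrite author's own statement) =====
-- stated objective: simpler
-- what changed: Drops the flag loop and any filtering of tags: since a matching tag must equal the target, B tests once whether the target itself is uppercase and a member of the raw list, falling back to 'no uppercase tag exists'.
import Mathlib
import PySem

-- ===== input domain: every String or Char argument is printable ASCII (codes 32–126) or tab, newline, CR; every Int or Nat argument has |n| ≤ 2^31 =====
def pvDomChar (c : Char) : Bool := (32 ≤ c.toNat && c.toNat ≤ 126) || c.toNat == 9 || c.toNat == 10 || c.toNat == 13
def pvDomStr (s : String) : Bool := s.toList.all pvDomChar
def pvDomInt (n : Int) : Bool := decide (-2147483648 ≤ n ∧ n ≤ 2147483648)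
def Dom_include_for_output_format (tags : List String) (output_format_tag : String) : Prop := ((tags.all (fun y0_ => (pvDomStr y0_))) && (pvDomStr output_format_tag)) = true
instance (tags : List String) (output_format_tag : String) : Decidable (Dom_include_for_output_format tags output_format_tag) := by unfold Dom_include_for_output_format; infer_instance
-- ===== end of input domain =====

-- ===== PORT A =====
-- B replaces the flag loop by one case test on the target plus raw membership; simpler, no speed claim.
-- Python str.isupper(), exact on the ASCII domain: some cased char exists and none is lowercase.
def pyStrIsUpper (s : String) : Bool :=
  s.toList.any PySem.Chars.isupper && !s.toList.any PySem.Chars.islower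

def includeLoop (tags : List String) (oft : String) (inc : Bool) : Bool :=
  match tags with
  | [] => inc
  | t :: rest =>
    if pyStrIsUpper t then
      if t == oft then true else includeLoop rest oft false
    else
      includeLoop rest oft inc

def include_for_output_format (tags : List String) (output_format_tag : String) : Bool :=
  includeLoop tags output_format_tag true

-- ===== PORT B =====
def include_for_output_format_alt (tags : List String) (output_format_tag : String) : Bool :=
  if pyStrIsUpper output_format_tag && tags.contains output_format_tag then
    true
  else
    !(tags.any pyStrIsUpper)

-- ===== PRECONDITION & SPEC =====
def Spec_include_for_output_format (tags : List String) (output_format_tag : String) (out : Bool) : Prop := out = include_for_output_format_alt tags output_format_tag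
instance (tags : List String) (output_format_tag : String) (out : Bool) : Decidable (Spec_include_for_output_format tags output_format_tag out) := by unfold Spec_include_for_output_format; infer_instance

-- ===== CLAIM (what is proved, stated in full; the proofs are below) =====
def Claim_equal_include_for_output_format : Prop := ∀ (tags : List String) (output_format_tag : String), Dom_include_for_output_format tags output_format_tag → Spec_include_for_output_format tags output_format_tag (include_for_output_format tags output_format_tag)

-- ===== LEMMAS AND PROOFS =====
-- Characterisation of A's loop: True iff some uppercase tag equals oft, else
-- the flag — which is the initial flag if no uppercase tag was seen, False otherwise.
theorem includeLoop_eq (tags : List String) (oft : String) (inc : Bool) :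
    includeLoop tags oft inc =
      (if pyStrIsUpper oft && tags.contains oft then true
       else if tags.any pyStrIsUpper then false else inc) := by
  induction tags generalizing inc with
  | nil => simp [includeLoop]
  | cons t rest ih =>
    rw [includeLoop]
    by_cases hu : pyStrIsUpper t = true
    · by_cases he : t = oft
      · subst he; simp [hu]
      · have he' : (t == oft) = false := by simpa using he
        have he'' : (oft == t) = false := by simpa using Ne.symm he
        simp only [hu, he', if_true, Bool.false_eq_true, ite_false, List.contains_cons,
          List.any_cons, he'', Bool.false_or, Bool.true_or]
        rw [ih]
        by_cases hm : (pyStrIsUpper oft && rest.contains oft) = true <;> simp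
    · have hu' : pyStrIsUpper t = false := by simpa using hu
      simp only [hu', Bool.false_eq_true, ite_false, List.contains_cons, List.any_cons,
        Bool.false_or]
      rw [ih]
      by_cases he : (oft == t) = true
      · have : t = oft := by simpa using (beq_iff_eq.mp he).symm
        subst this
        simp [hu']
      · have he' : (oft == t) = false := by simpa using he
        simp [he']

-- ===== VERDICT (by name: the statement is the Claim_ definition above) =====
theorem include_for_output_format_spec : Claim_equal_include_for_output_format := by
  intro tags oft _
  unfold Spec_include_for_output_format include_for_output_format include_for_output_format_alt
  rw [includeLoop_eq]
  by_cases hm : (pyStrIsUpper oft && tags.contains oft) = true <;>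
    cases h : tags.any pyStrIsUpper <;> simp [hm, h] <;> simp_all
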